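-- pv_equiv track=rewrite | github.com/brandoneng000/LeetCode | medium/1807.py | evaluate
-- ===== SOURCE A (Python) =====
-- from typing import List
--
-- def evaluate(s: str, knowledge: List[List[str]]) -> str:
--     knowledge_dict = {}
--     stack = []
--     res = []
--
--     for k, v in knowledge:
--         knowledge_dict[k] = v
--
--     for c in s:
--         if stack:
--             stack.append(c)
--         else:
--             if c == '(':
--                 stack.append(c)
--             else:
--                 res.append(c)
--
--         if stack and stack[-1] == ')':
--             key = ''.join(stack[1:-1])
--             stack.clear()
--             res.append(knowledge_dict.get(key, '?'))
--
--     return "".join(res)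
-- ===== SOURCE B (Python) =====
-- def evaluate(s, knowledge):
--     knowledge_dict = dict(knowledge)
--     res = []
--     rest = s
--     while True:
--         lit, br, rest = rest.partition('(')
--         res.append(lit)
--         if not br:
--             break
--         key, br2, rest = rest.partition(')')
--         if not br2:
--             break
--         res.append(knowledge_dict.get(key, '?'))
--     return "".join(res)
-- ===== Notes on version B (the rewrite author's own statement) =====
-- stated objective: simpler
-- what changed: A scans character by character maintaining an explicit stack and flush logic; B jumps between delimiters with str.partition, emitting literal text, then a dictionary lookup for each '('-to-')' segment.
import Mathlib
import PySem

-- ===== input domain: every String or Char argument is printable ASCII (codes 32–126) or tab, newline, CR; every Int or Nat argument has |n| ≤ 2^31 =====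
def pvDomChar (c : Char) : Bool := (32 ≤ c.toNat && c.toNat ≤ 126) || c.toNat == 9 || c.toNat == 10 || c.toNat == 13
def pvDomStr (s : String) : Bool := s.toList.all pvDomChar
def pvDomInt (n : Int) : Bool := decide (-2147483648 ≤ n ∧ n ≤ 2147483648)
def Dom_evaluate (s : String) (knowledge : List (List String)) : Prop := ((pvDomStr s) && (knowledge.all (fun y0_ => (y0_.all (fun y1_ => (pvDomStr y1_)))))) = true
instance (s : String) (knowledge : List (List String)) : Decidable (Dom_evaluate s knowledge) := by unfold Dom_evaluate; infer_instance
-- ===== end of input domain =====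

-- B replaces A's character-by-character stack scan with segment jumps: partition on '(' / ')'
-- and emit literal text, lookup, literal text, … (objective: simpler; same asymptotic cost).

-- shared dict build: A's `for k, v in knowledge: d[k] = v` and B's `dict(knowledge)` are the
-- same insertion fold (last duplicate wins); rows of length ≠ 2 raise in both Pythons (excluded by Pre_).
def pvDict (knowledge : List (List String)) : PySem.Dict String String :=
  knowledge.foldl (fun d row =>
    match row with
    | [k, v] => d.insert k v
    | _ => d) PySem.Dict.empty

-- ===== PORT A =====
-- one iteration of A's `for c in s` loop over the state (stack, res).
-- `stack[-1] == ')'` guarded by `stack` is exactly `getLast? = some ')'`;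
-- `stack[1:-1]` is exactly `(stack.drop 1).dropLast` (both are [] when len ≤ 1).
def pvStepA (d : PySem.Dict String String) (acc : List Char × List String) (c : Char) :
    List Char × List String :=
  let stack := acc.1
  let res := acc.2
  let (stack, res) :=
    if stack ≠ [] then (stack ++ [c], res)
    else if c = '(' then (stack ++ [c], res)
    else (stack, res ++ [String.ofList [c]])
  if stack.getLast? = some ')' then
    ([], res ++ [PySem.Dict.getD d (String.ofList ((stack.drop 1).dropLast)) "?"])
  else (stack, res)

def evaluate (s : String) (knowledge : List (List String)) : String :=
  PySem.Str.join "" ((s.toList.foldl (pvStepA (pvDict knowledge)) ([], [])).2)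

-- ===== PORT B =====
-- B's `while True` with `rest.partition('(')` / `rest.partition(')')`:
-- partition on a single char is exactly takeWhile/dropWhile + dropping the separator.
def pvLoopB (d : PySem.Dict String String) (cs : List Char) : List String :=
  let lit := cs.takeWhile (· != '(')
  let rest := cs.dropWhile (· != '(')
  match hr : rest with
  | [] => [String.ofList lit]
  | _ :: rest2 =>
    let key := rest2.takeWhile (· != ')')
    let rest3 := rest2.dropWhile (· != ')')
    match h : rest3 with
    | [] => [String.ofList lit]
    | _ :: rest4 => String.ofList lit :: PySem.Dict.getD d (String.ofList key) "?" :: pvLoopB d rest4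
termination_by cs.length
decreasing_by
  have h1 : rest3.length ≤ rest2.length := List.length_dropWhile_le _ _
  have h2 : rest.length ≤ cs.length := List.length_dropWhile_le _ _
  simp only [h] at h1
  simp only [hr] at h2
  simp only [List.length_cons] at *
  omega

def evaluate_alt (s : String) (knowledge : List (List String)) : String :=
  PySem.Str.join "" (pvLoopB (pvDict knowledge) s.toList)

-- ===== PRECONDITION & SPEC =====
-- Pre_ excludes knowledge rows whose length is not 2: on those both Pythons raise ValueError
-- (A in `for k, v in knowledge`, B in `dict(knowledge)`).
def Pre_evaluate (s : String) (knowledge : List (List String)) : Prop :=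
  ∀ row ∈ knowledge, row.length = 2
instance (s : String) (knowledge : List (List String)) : Decidable (Pre_evaluate s knowledge) := by
  unfold Pre_evaluate; infer_instance

def pvWitness_evaluate : String × List (List String) := ("hello(name)!", [["name", "bob"]])

def Spec_evaluate (s : String) (knowledge : List (List String)) (out : String) : Prop := out = evaluate_alt s knowledge
instance (s : String) (knowledge : List (List String)) (out : String) : Decidable (Spec_evaluate s knowledge out) := by unfold Spec_evaluate; infer_instance

-- ===== CLAIM (what is proved, stated in full; the proofs are below) =====
def Claim_equal_evaluate : Prop := ∀ (s : String) (knowledge : List (List String)), Dom_evaluate s knowledge → Pre_evaluate s knowledge → Spec_evaluate s knowledge (evaluate s knowledge)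

-- ===== LEMMAS AND PROOFS =====

-- join with empty separator is flatten
theorem pvJoinNilFlatten (ps : List (List Char)) : PySem.Chars.join [] ps = ps.flatten := by
  induction ps with
  | nil => simp [PySem.Chars.join_nil]
  | cons p rest ih =>
    cases rest with
    | nil => simp [PySem.Chars.join_singleton]
    | cons q r => rw [PySem.Chars.join_cons_cons]; simp_all

def pvF (res : List String) : List Char := (res.map String.toList).flatten

theorem pvF_append (a b : List String) : pvF (a ++ b) = pvF a ++ pvF b := by
  simp [pvF]

theorem pvF_singles (lit : List Char) :
    pvF (lit.map (fun c => String.ofList [c])) = lit := by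
  induction lit with
  | nil => rfl
  | cons c cs ih =>
    simp only [pvF, List.map_cons, List.map_map, List.flatten_cons] at *
    simp [ih]

-- single-step facts about A's loop body
theorem pvStepA_lit (d : PySem.Dict String String) (res : List String) (c : Char) (hc : c ≠ '(') :
    pvStepA d ([], res) c = ([], res ++ [String.ofList [c]]) := by
  simp [pvStepA, hc]

theorem pvStepA_open (d : PySem.Dict String String) (res : List String) :
    pvStepA d ([], res) '(' = (['('], res) := by
  simp [pvStepA]

theorem pvGetLastConcat (l : List Char) (a : Char) :
    ('(' :: (l ++ [a])).getLast? = some a := by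
  rw [show ('(' :: (l ++ [a])) = ('(' :: l) ++ [a] by simp]
  exact List.getLast?_concat

theorem pvStepA_cap (d : PySem.Dict String String) (acc : List Char) (res : List String)
    (c : Char) (hc : c ≠ ')') :
    pvStepA d ('(' :: acc, res) c = ('(' :: (acc ++ [c]), res) := by
  simp [pvStepA, pvGetLastConcat, hc]

theorem pvStepA_close (d : PySem.Dict String String) (acc : List Char) (res : List String) :
    pvStepA d ('(' :: acc, res) ')' = ([], res ++ [PySem.Dict.getD d (String.ofList acc) "?"]) := by
  simp [pvStepA, pvGetLastConcat]

-- folding A over literal text just copies it into res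
theorem pvFoldA_lit (d : PySem.Dict String String) (lit : List Char)
    (hlit : ∀ c ∈ lit, c ≠ '(') (res : List String) (cs : List Char) :
    (lit ++ cs).foldl (pvStepA d) ([], res) =
      cs.foldl (pvStepA d) ([], res ++ lit.map (fun c => String.ofList [c])) := by
  induction lit generalizing res with
  | nil => simp
  | cons c rest ih =>
    have hc : c ≠ '(' := hlit c (by simp)
    simp only [List.cons_append, List.foldl_cons, pvStepA_lit d res c hc]
    rw [ih (fun x hx => hlit x (by simp [hx])) (res ++ [String.ofList [c]])]
    simp

-- folding A over key text just grows the stack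
theorem pvFoldA_cap (d : PySem.Dict String String) (key : List Char)
    (hkey : ∀ c ∈ key, c ≠ ')') (acc : List Char) (res : List String) (cs : List Char) :
    (key ++ cs).foldl (pvStepA d) ('(' :: acc, res) =
      cs.foldl (pvStepA d) ('(' :: (acc ++ key), res) := by
  induction key generalizing acc with
  | nil => simp
  | cons c rest ih =>
    have hc : c ≠ ')' := hkey c (by simp)
    simp only [List.cons_append, List.foldl_cons, pvStepA_cap d acc res c hc]
    rw [ih (fun x hx => hkey x (by simp [hx])) (acc ++ [c])]
    simp

theorem pvHeadDrop (p : Char → Bool) (l : List Char) (x : Char) (xs : List Char)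
    (h : l.dropWhile p = x :: xs) : p x = false := by
  have := List.head_dropWhile_not p (l := l) (by simp [h])
  simpa [h] using this

theorem pvLoopB_lit (d : PySem.Dict String String) (cs : List Char)
    (h : cs.dropWhile (· != '(') = []) :
    pvLoopB d cs = [String.ofList (cs.takeWhile (· != '('))] := by
  rw [pvLoopB]
  split
  · rfl
  · rename_i heq; rw [h] at heq; cases heq

theorem pvLoopB_noclose (d : PySem.Dict String String) (cs : List Char) (c : Char)
    (rest2 : List Char) (h : cs.dropWhile (· != '(') = c :: rest2)
    (h2 : rest2.dropWhile (· != ')') = []) :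
    pvLoopB d cs = [String.ofList (cs.takeWhile (· != '('))] := by
  rw [pvLoopB]
  split
  · rfl
  · rename_i heq
    rw [h] at heq
    cases heq
    dsimp only
    split
    · rfl
    · rename_i heq2; rw [h2] at heq2; cases heq2

theorem pvLoopB_step (d : PySem.Dict String String) (cs : List Char) (c c2 : Char)
    (rest2 rest4 : List Char) (h : cs.dropWhile (· != '(') = c :: rest2)
    (h2 : rest2.dropWhile (· != ')') = c2 :: rest4) :
    pvLoopB d cs = String.ofList (cs.takeWhile (· != '(')) ::
      PySem.Dict.getD d (String.ofList (rest2.takeWhile (· != ')'))) "?" :: pvLoopB d rest4 := by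
  rw [pvLoopB]
  split
  · rename_i heq; rw [h] at heq; cases heq
  · rename_i heq
    rw [h] at heq
    cases heq
    dsimp only
    split
    · rename_i heq2; rw [h2] at heq2; cases heq2
    · rename_i heq2
      rw [h2] at heq2
      cases heq2
      rfl

theorem pvMain (d : PySem.Dict String String) (n : Nat) :
    ∀ cs : List Char, cs.length ≤ n → ∀ res : List String,
      pvF ((cs.foldl (pvStepA d) ([], res)).2) = pvF res ++ pvF (pvLoopB d cs) := by
  induction n with
  | zero =>
    intro cs hcs res
    have : cs = [] := List.eq_nil_of_length_eq_zero (Nat.le_zero.mp hcs)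
    subst this
    simp [pvLoopB, pvF]
  | succ n ih =>
    intro cs hcs res
    have hsplit : cs.takeWhile (· != '(') ++ cs.dropWhile (· != '(') = cs :=
      List.takeWhile_append_dropWhile
    have hlit : ∀ c ∈ cs.takeWhile (· != '('), c ≠ '(' := by
      intro c hc
      have := List.mem_takeWhile_imp hc
      simpa using this
    have hres1 : pvF (res ++ (cs.takeWhile (· != '(')).map (fun c => String.ofList [c]))
        = pvF res ++ cs.takeWhile (· != '(') := by
      rw [pvF_append, pvF_singles]
    conv_lhs => rw [← hsplit]
    rw [pvFoldA_lit d _ hlit res _]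
    cases hrest : cs.dropWhile (· != '(') with
    | nil =>
      simp only [List.foldl_nil]
      rw [hres1, pvLoopB_lit d cs hrest]
      simp [pvF]
    | cons h rest2 =>
      have hopen : h = '(' := by
        have := pvHeadDrop _ _ _ _ hrest
        simpa using this
      subst hopen
      simp only [List.foldl_cons, pvStepA_open]
      have hsplit2 : rest2.takeWhile (· != ')') ++ rest2.dropWhile (· != ')') = rest2 :=
        List.takeWhile_append_dropWhile
      have hkey : ∀ c ∈ rest2.takeWhile (· != ')'), c ≠ ')' := by
        intro c hc
        have := List.mem_takeWhile_imp hc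
        simpa using this
      conv_lhs => rw [← hsplit2]
      rw [pvFoldA_cap d _ hkey [] _ _]
      simp only [List.nil_append]
      cases hrest3 : rest2.dropWhile (· != ')') with
      | nil =>
        simp only [List.foldl_nil]
        rw [hres1, pvLoopB_noclose d cs _ _ hrest hrest3]
        simp [pvF]
      | cons h2 rest4 =>
        have hclose : h2 = ')' := by
          have := pvHeadDrop _ _ _ _ hrest3
          simpa using this
        subst hclose
        simp only [List.foldl_cons, pvStepA_close]
        have hlen : rest4.length ≤ n := by
          have h1 : (rest2.dropWhile (· != ')')).length ≤ rest2.length :=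
            List.length_dropWhile_le _ _
          have h2 : (cs.dropWhile (· != '(')).length ≤ cs.length :=
            List.length_dropWhile_le _ _
          rw [hrest3] at h1
          rw [hrest] at h2
          simp only [List.length_cons] at h1 h2
          omega
        rw [ih rest4 hlen]
        rw [pvLoopB_step d cs _ _ _ _ hrest hrest3]
        rw [pvF_append, hres1]
        simp [pvF]

-- ===== VERDICT (by name: the statement is the Claim_ definition above) =====
theorem evaluate_spec : Claim_equal_evaluate := by
  intro s knowledge _ _
  unfold Spec_evaluate evaluate evaluate_alt
  have hmain := pvMain (pvDict knowledge) s.toList.length s.toList (le_refl _) []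
  have h1 : (PySem.Str.join "" ((s.toList.foldl (pvStepA (pvDict knowledge)) ([], [])).2)).toList
      = (PySem.Str.join "" (pvLoopB (pvDict knowledge) s.toList)).toList := by
    rw [PySem.Str.toList_join, PySem.Str.toList_join]
    simp only [String.toList_empty] at *
    rw [pvJoinNilFlatten, pvJoinNilFlatten]
    simpa [pvF] using hmain
  exact String.toList_injective h1
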